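-- pv_equiv track=rewrite | github.com/subgroup-fair/main | scripts/validation/validation_reporter.py | _is_related_repro_issue
-- ===== SOURCE A (Python) =====
-- def _is_related_repro_issue(issue_type: str, checklist_item: str) -> bool:
--     """Check if issue type relates to checklist item"""
--
--     mappings = {
--         "random": "Random seed set",
--         "seed": "Random seed set",
--         "dependency": "Dependencies documented",
--         "requirements": "Dependencies documented",
--         "version": "Code version controlled",
--         "preprocessing": "Data preprocessing documented",
--         "environment": "Computational environment documented",
--         "parameter": "Parameters explicitly specified"
--     }
--
--     for key, item in mappings.items():
--         if key in issue_type.lower() and item == checklist_item: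
--             return True
--
--     return False
-- ===== SOURCE B (Python) =====
-- _KEYWORDS_BY_ITEM = {
--     "Random seed set": ["random", "seed"],
--     "Dependencies documented": ["dependency", "requirements"],
--     "Code version controlled": ["version"],
--     "Data preprocessing documented": ["preprocessing"],
--     "Computational environment documented": ["environment"],
--     "Parameters explicitly specified": ["parameter"],
-- }
--
--
-- def _is_related_repro_issue(issue_type: str, checklist_item: str) -> bool:
--     keywords = _KEYWORDS_BY_ITEM.get(checklist_item)
--     if keywords is None:
--         return False
--     lowered = issue_type.lower()
--     return any(k in lowered for k in keywords)
-- ===== Notes on version B (the rewrite author's own statement) =====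
-- stated objective: simpler
-- what changed: Replaces the linear scan over all 8 keyword->item pairs with a reverse index keyed by checklist item: one dict lookup on checklist_item, then a scan of only that item's keywords against issue_type.lower() computed once.
import Mathlib
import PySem

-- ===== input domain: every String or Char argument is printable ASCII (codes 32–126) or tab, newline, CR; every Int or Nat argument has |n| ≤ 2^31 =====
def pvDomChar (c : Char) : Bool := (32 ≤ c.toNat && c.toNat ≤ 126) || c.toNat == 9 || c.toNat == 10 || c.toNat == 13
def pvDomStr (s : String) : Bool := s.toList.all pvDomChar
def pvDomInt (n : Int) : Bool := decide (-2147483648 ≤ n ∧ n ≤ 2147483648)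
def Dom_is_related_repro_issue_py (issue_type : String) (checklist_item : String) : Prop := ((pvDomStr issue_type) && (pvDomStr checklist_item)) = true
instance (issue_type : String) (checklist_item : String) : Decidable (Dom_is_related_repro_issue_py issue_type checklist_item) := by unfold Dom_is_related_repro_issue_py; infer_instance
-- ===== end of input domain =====

-- B replaces A's scan over all keyword→item pairs with a reverse index keyed by the
-- checklist item (one lookup, then a scan of only that item's keywords); objective: simpler.

-- ===== PORT A =====
-- the 8 (key, item) pairs of A's dict, in insertion order
def pvMappings : List (String × String) :=
  [("random", "Random seed set"),
   ("seed", "Random seed set"),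
   ("dependency", "Dependencies documented"),
   ("requirements", "Dependencies documented"),
   ("version", "Code version controlled"),
   ("preprocessing", "Data preprocessing documented"),
   ("environment", "Computational environment documented"),
   ("parameter", "Parameters explicitly specified")]

-- the 'for key, item in mappings.items(): if …: return True' loop, with early return
def pvALoop (issue_type checklist_item : String) : List (String × String) → Bool
  | [] => false
  | (key, item) :: rest =>
      if PySem.Str.isIn key (PySem.Str.lower issue_type) && item == checklist_item then true
      else pvALoop issue_type checklist_item rest

def is_related_repro_issue_py (issue_type : String) (checklist_item : String) : Bool :=
  pvALoop issue_type checklist_item pvMappings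

-- ===== PORT B =====
-- reverse index: checklist item → the keywords that select it (module-level dict in Source B)
def pvKeywordsByItem : PySem.Dict String (List String) :=
  PySem.Dict.ofList
    [("Random seed set", ["random", "seed"]),
     ("Dependencies documented", ["dependency", "requirements"]),
     ("Code version controlled", ["version"]),
     ("Data preprocessing documented", ["preprocessing"]),
     ("Computational environment documented", ["environment"]),
     ("Parameters explicitly specified", ["parameter"])]

def is_related_repro_issue_py_alt (issue_type : String) (checklist_item : String) : Bool :=
  match pvKeywordsByItem.get? checklist_item with
  | none => false
  | some keywords =>
      let lowered := PySem.Str.lower issue_type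
      keywords.any (fun k => PySem.Str.isIn k lowered)

-- ===== PRECONDITION & SPEC =====
def Spec_is_related_repro_issue_py (issue_type : String) (checklist_item : String) (out : Bool) : Prop := out = is_related_repro_issue_py_alt issue_type checklist_item
instance (issue_type : String) (checklist_item : String) (out : Bool) : Decidable (Spec_is_related_repro_issue_py issue_type checklist_item out) := by unfold Spec_is_related_repro_issue_py; infer_instance

-- ===== CLAIM (what is proved, stated in full; the proofs are below) =====
def Claim_equal_is_related_repro_issue_py : Prop := ∀ (issue_type : String) (checklist_item : String), Dom_is_related_repro_issue_py issue_type checklist_item → Spec_is_related_repro_issue_py issue_type checklist_item (is_related_repro_issue_py issue_type checklist_item)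

-- ===== LEMMAS AND PROOFS =====

theorem pv_eq (issue_type checklist_item : String) :
    is_related_repro_issue_py issue_type checklist_item
      = is_related_repro_issue_py_alt issue_type checklist_item := by
  by_cases h1 : checklist_item = "Random seed set"
  · subst h1; simp [is_related_repro_issue_py, is_related_repro_issue_py_alt, pvALoop,
      pvMappings, pvKeywordsByItem, PySem.Dict.ofList, PySem.Dict.get?, PySem.Dict.update, PySem.Dict.insert, PySem.Dict.contains, PySem.Dict.empty, List.foldl]
  by_cases h2 : checklist_item = "Dependencies documented"
  · subst h2; simp [is_related_repro_issue_py, is_related_repro_issue_py_alt, pvALoop,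
      pvMappings, pvKeywordsByItem, PySem.Dict.ofList, PySem.Dict.get?, PySem.Dict.update, PySem.Dict.insert, PySem.Dict.contains, PySem.Dict.empty, List.foldl]
  by_cases h3 : checklist_item = "Code version controlled"
  · subst h3; simp [is_related_repro_issue_py, is_related_repro_issue_py_alt, pvALoop,
      pvMappings, pvKeywordsByItem, PySem.Dict.ofList, PySem.Dict.get?, PySem.Dict.update, PySem.Dict.insert, PySem.Dict.contains, PySem.Dict.empty, List.foldl]
  by_cases h4 : checklist_item = "Data preprocessing documented"
  · subst h4; simp [is_related_repro_issue_py, is_related_repro_issue_py_alt, pvALoop,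
      pvMappings, pvKeywordsByItem, PySem.Dict.ofList, PySem.Dict.get?, PySem.Dict.update, PySem.Dict.insert, PySem.Dict.contains, PySem.Dict.empty, List.foldl]
  by_cases h5 : checklist_item = "Computational environment documented"
  · subst h5; simp [is_related_repro_issue_py, is_related_repro_issue_py_alt, pvALoop,
      pvMappings, pvKeywordsByItem, PySem.Dict.ofList, PySem.Dict.get?, PySem.Dict.update, PySem.Dict.insert, PySem.Dict.contains, PySem.Dict.empty, List.foldl]
  by_cases h6 : checklist_item = "Parameters explicitly specified"
  · subst h6; simp [is_related_repro_issue_py, is_related_repro_issue_py_alt, pvALoop,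
      pvMappings, pvKeywordsByItem, PySem.Dict.ofList, PySem.Dict.get?, PySem.Dict.update, PySem.Dict.insert, PySem.Dict.contains, PySem.Dict.empty, List.foldl]
  · have e1 : ("Random seed set" == checklist_item) = false := beq_eq_false_iff_ne.mpr (Ne.symm h1)
    have e2 : ("Dependencies documented" == checklist_item) = false := beq_eq_false_iff_ne.mpr (Ne.symm h2)
    have e3 : ("Code version controlled" == checklist_item) = false := beq_eq_false_iff_ne.mpr (Ne.symm h3)
    have e4 : ("Data preprocessing documented" == checklist_item) = false := beq_eq_false_iff_ne.mpr (Ne.symm h4)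
    have e5 : ("Computational environment documented" == checklist_item) = false := beq_eq_false_iff_ne.mpr (Ne.symm h5)
    have e6 : ("Parameters explicitly specified" == checklist_item) = false := beq_eq_false_iff_ne.mpr (Ne.symm h6)
    simp [is_related_repro_issue_py, is_related_repro_issue_py_alt, pvALoop, pvMappings,
      pvKeywordsByItem, PySem.Dict.ofList, PySem.Dict.get?, PySem.Dict.update, PySem.Dict.insert,
      PySem.Dict.contains, PySem.Dict.empty, List.find?, e1, e2, e3, e4, e5, e6]

-- ===== VERDICT (by name: the statement is the Claim_ definition above) =====
theorem is_related_repro_issue_py_spec : Claim_equal_is_related_repro_issue_py := by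
  intro issue_type checklist_item _
  exact pv_eq issue_type checklist_item
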